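-- pv_equiv track=rewrite | github.com/Maxbaut/SAE-601_Developpement_outil_decisionnel2 | SAE-601_Pokemon/data_transformation/main.py | get_final_evolution_pokemons
-- ===== SOURCE A (Python) =====
-- def build_evolution_hierarchy(cards_data):
--     """Construire une hiérarchie d'évolution à partir des données des cartes."""
--     evolution_hierarchy = {}
--     for card in cards_data:
--         pokemon_name = card["name"].split(" (")[0]
--         evolves_from = card.get("evolves_from", "N/A")
--         if evolves_from != "N/A":
--             if evolves_from not in evolution_hierarchy:
--                 evolution_hierarchy[evolves_from] = []
--             evolution_hierarchy[evolves_from].append(pokemon_name)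
--     return evolution_hierarchy
--
-- def check_final_evolution(pokemon_name, evolution_hierarchy):
--     """Vérifie si un Pokémon est une évolution finale."""
--     return pokemon_name not in evolution_hierarchy
--
-- def get_final_evolution_pokemons(detailed_cards_data):
--     """Identifie les Pokémon au stade final de leur évolution."""
--     evolution_hierarchy = build_evolution_hierarchy(detailed_cards_data)
--     final_evolution_pokemons = set()
--
--     for card in detailed_cards_data:
--         pokemon_name = card["name"].split(" (")[0]
--         if check_final_evolution(pokemon_name, evolution_hierarchy):
--             final_evolution_pokemons.add(pokemon_name)
--
--     return final_evolution_pokemons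
-- ===== SOURCE B (Python) =====
-- def _has_evolution(name, cards):
--     """Inner scan: does any card evolve from `name`? ('N/A' means no parent)."""
--     for c in cards:
--         v = c.get("evolves_from", "N/A")
--         if v != "N/A" and v == name:
--             return True
--     return False
--
--
-- def get_final_evolution_pokemons(detailed_cards_data):
--     """Identifie les Pokemon au stade final de leur evolution.
--
--     Brute force with no auxiliary index: a name is final exactly when a
--     direct inner scan finds no card that evolves from it.
--     """
--     final_evolution_pokemons = set()
--     for card in detailed_cards_data:
--         name = card["name"].split(" (")[0]
--         if not _has_evolution(name, detailed_cards_data):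
--             final_evolution_pokemons.add(name)
--     return final_evolution_pokemons
-- ===== Notes on version B (the rewrite author's own statement) =====
-- stated objective: alternative
-- what changed: Drops A's precomputed dict-of-lists hierarchy and its membership test entirely: B builds no auxiliary structure and instead decides finality of each name by a direct inner scan over all cards for a matching evolves_from value (index-free nested scan vs precomputed hash index).
import Mathlib
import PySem

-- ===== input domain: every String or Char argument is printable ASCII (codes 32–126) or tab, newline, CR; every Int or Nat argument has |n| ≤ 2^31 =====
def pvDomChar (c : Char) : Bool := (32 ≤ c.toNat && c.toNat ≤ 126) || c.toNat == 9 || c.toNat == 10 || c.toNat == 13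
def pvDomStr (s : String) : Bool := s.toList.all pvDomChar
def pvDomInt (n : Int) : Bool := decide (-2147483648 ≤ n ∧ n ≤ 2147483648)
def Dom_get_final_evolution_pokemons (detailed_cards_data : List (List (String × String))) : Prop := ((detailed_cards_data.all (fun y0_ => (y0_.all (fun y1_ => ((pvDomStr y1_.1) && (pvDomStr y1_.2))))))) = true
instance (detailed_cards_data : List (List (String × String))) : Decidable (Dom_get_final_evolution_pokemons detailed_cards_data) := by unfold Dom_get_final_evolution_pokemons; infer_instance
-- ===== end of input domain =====

-- B drops A's precomputed dict-of-lists hierarchy: it builds no index and decides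
-- finality of each name by a direct inner scan over all cards (objective: alternative).

-- Shared dict-access helper (first-match lookup, the assoc-list dict convention):
-- card[k] / card.get(k, dflt); exact on inputs where the key is present (Pre_).
def pvGet (card : List (String × String)) (k : String) : Option String :=
  (card.find? (fun p => p.1 == k)).map (·.2)

-- card["name"].split(" (")[0] — split? with sep " (" ≠ "" is always some and never [],
-- so getD []/headD "" are exact for the Python expression
def pvName (card : List (String × String)) : String :=
  (((PySem.Str.split? ((pvGet card "name").getD "") " (").getD []).headD "")

-- card.get("evolves_from", "N/A")
def pvEvolvesFrom (card : List (String × String)) : String :=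
  (pvGet card "evolves_from").getD "N/A"

-- ===== PORT A =====
def build_evolution_hierarchy (cards_data : List (List (String × String))) :
    PySem.Dict String (List String) :=
  cards_data.foldl (fun evolution_hierarchy card =>
    let pokemon_name := pvName card
    let evolves_from := pvEvolvesFrom card
    if evolves_from ≠ "N/A" then
      let evolution_hierarchy :=
        if evolution_hierarchy.contains evolves_from then evolution_hierarchy
        else evolution_hierarchy.insert evolves_from []
      evolution_hierarchy.modify evolves_from [] (fun l => l ++ [pokemon_name])
    else evolution_hierarchy) PySem.Dict.empty

def check_final_evolution (pokemon_name : String)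
    (evolution_hierarchy : PySem.Dict String (List String)) : Bool :=
  !(evolution_hierarchy.contains pokemon_name)

def get_final_evolution_pokemons (detailed_cards_data : List (List (String × String))) : List String :=
  let evolution_hierarchy := build_evolution_hierarchy detailed_cards_data
  detailed_cards_data.foldl (fun final_evolution_pokemons card =>
    let pokemon_name := pvName card
    if check_final_evolution pokemon_name evolution_hierarchy then
      PySem.Set.add final_evolution_pokemons pokemon_name
    else final_evolution_pokemons) PySem.Set.empty

-- ===== PORT B =====
-- _has_evolution(name, cards): early-return for-loop = List.any
def has_evolution (name : String) (cards : List (List (String × String))) : Bool :=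
  cards.any (fun c =>
    let v := pvEvolvesFrom c
    v != "N/A" && v == name)

def get_final_evolution_pokemons_alt (detailed_cards_data : List (List (String × String))) : List String :=
  detailed_cards_data.foldl (fun final_evolution_pokemons card =>
    let name := pvName card
    if !(has_evolution name detailed_cards_data) then
      PySem.Set.add final_evolution_pokemons name
    else final_evolution_pokemons) PySem.Set.empty

-- ===== PRECONDITION & SPEC =====
-- Pre_ excludes exactly the inputs where some card has no "name" key: there the
-- Python A raises KeyError (and B raises the same KeyError).
def Pre_get_final_evolution_pokemons (detailed_cards_data : List (List (String × String))) : Prop :=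
  ∀ card ∈ detailed_cards_data, ∃ p ∈ card, p.1 = "name"
instance (detailed_cards_data : List (List (String × String))) : Decidable (Pre_get_final_evolution_pokemons detailed_cards_data) := by unfold Pre_get_final_evolution_pokemons; infer_instance

def pvWitness_get_final_evolution_pokemons : (List (List (String × String))) :=
  [[("name", "Raichu (holo)"), ("evolves_from", "Pikachu")],
   [("name", "Pikachu"), ("evolves_from", "Pichu")],
   [("name", "Pichu")]]

def Spec_get_final_evolution_pokemons (detailed_cards_data : List (List (String × String))) (out : List String) : Prop := out = get_final_evolution_pokemons_alt detailed_cards_data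
instance (detailed_cards_data : List (List (String × String))) (out : List String) : Decidable (Spec_get_final_evolution_pokemons detailed_cards_data out) := by unfold Spec_get_final_evolution_pokemons; infer_instance

-- ===== CLAIM (what is proved, stated in full; the proofs are below) =====
def Claim_equal_get_final_evolution_pokemons : Prop := ∀ (detailed_cards_data : List (List (String × String))), Dom_get_final_evolution_pokemons detailed_cards_data → Pre_get_final_evolution_pokemons detailed_cards_data → Spec_get_final_evolution_pokemons detailed_cards_data (get_final_evolution_pokemons detailed_cards_data)

-- ===== LEMMAS AND PROOFS =====

-- The hierarchy dict's keys are exactly the non-"N/A" evolves_from values.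
theorem contains_hierarchy_aux (cards : List (List (String × String)))
    (d : PySem.Dict String (List String)) (k : String) :
    (cards.foldl (fun evolution_hierarchy card =>
      let pokemon_name := pvName card
      let evolves_from := pvEvolvesFrom card
      if evolves_from ≠ "N/A" then
        let evolution_hierarchy :=
          if evolution_hierarchy.contains evolves_from then evolution_hierarchy
          else evolution_hierarchy.insert evolves_from []
        evolution_hierarchy.modify evolves_from [] (fun l => l ++ [pokemon_name])
      else evolution_hierarchy) d).contains k = true ↔
    (d.contains k = true ∨ (k ∈ cards.map pvEvolvesFrom ∧ k ≠ "N/A")) := by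
  induction cards generalizing d with
  | nil => simp
  | cons card rest ih =>
    simp only [List.foldl_cons, List.map_cons, List.mem_cons]
    rw [ih]
    by_cases hne : pvEvolvesFrom card = "N/A"
    · rw [if_neg (not_not_intro hne)]
      constructor
      · rintro (h | h)
        · tauto
        · exact Or.inr ⟨Or.inr h.1, h.2⟩
      · rintro (h | ⟨(h1 | h1), h2⟩)
        · tauto
        · exact absurd (h1 ▸ hne) h2
        · tauto
    · rw [if_pos hne]
      simp only [PySem.Dict.modify]
      rw [PySem.Dict.contains_insert]
      by_cases hk : k = pvEvolvesFrom card
      · subst hk; simp [hne]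
      · have hbeq : (k == pvEvolvesFrom card) = false := by
          simp [hk]
        simp only [hbeq, Bool.false_or]
        split
        · tauto
        · rw [PySem.Dict.contains_insert, hbeq, Bool.false_or]
          tauto

-- A's membership test in the precomputed hierarchy decides exactly what B's
-- direct inner scan decides.
theorem contains_eq_has_evolution (cards : List (List (String × String))) (k : String) :
    (build_evolution_hierarchy cards).contains k = has_evolution k cards := by
  have hL := contains_hierarchy_aux cards PySem.Dict.empty k
  simp only [PySem.Dict.contains_empty, Bool.false_eq_true, false_or] at hL
  have hR : has_evolution k cards = true ↔ (k ∈ cards.map pvEvolvesFrom ∧ k ≠ "N/A") := by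
    simp only [has_evolution, List.any_eq_true, Bool.and_eq_true, bne_iff_ne, beq_iff_eq,
      List.mem_map]
    constructor
    · rintro ⟨c, hc, hne, heq⟩
      exact ⟨⟨c, hc, heq⟩, heq ▸ hne⟩
    · rintro ⟨⟨c, hc, heq⟩, hne⟩
      exact ⟨c, hc, fun h => hne (h ▸ heq.symm), heq⟩
  rw [build_evolution_hierarchy]
  exact Bool.eq_iff_iff.mpr (hL.trans hR.symm)

-- ===== VERDICT (by name: the statement is the Claim_ definition above) =====
theorem get_final_evolution_pokemons_spec : Claim_equal_get_final_evolution_pokemons := by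
  intro data _ _
  unfold Spec_get_final_evolution_pokemons
  unfold get_final_evolution_pokemons get_final_evolution_pokemons_alt
  simp only [check_final_evolution, contains_eq_has_evolution]
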